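-- pv_equiv track=rewrite | github.com/iDorgham/Ai-Workspace-Factory-AIWF | factory/scripts/analytics/scan_library_skills_similarity.py | cluster_union_find
-- ===== SOURCE A (Python) =====
-- from collections import defaultdict
--
-- def cluster_union_find(n: int, edges: list[tuple[int, int]]) -> list[set[int]]:
--     parent = list(range(n))
--
--     def find(x: int) -> int:
--         while parent[x] != x:
--             parent[x] = parent[parent[x]]
--             x = parent[x]
--         return x
--
--     def union(a: int, b: int) -> None:
--         ra, rb = find(a), find(b)
--         if ra != rb:
--             parent[rb] = ra
--
--     for a, b in edges:
--         union(a, b)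
--     groups: dict[int, set[int]] = defaultdict(set)
--     for i in range(n):
--         groups[find(i)].add(i)
--     return [g for g in groups.values() if len(g) > 1]
-- ===== SOURCE B (Python) =====
-- def cluster_union_find(n: int, edges: list[tuple[int, int]]) -> list[set[int]]:
--     label = list(range(n))
--     for a, b in edges:
--         la, lb = label[a], label[b]
--         if la != lb:
--             label = [la if x == lb else x for x in label]
--     groups: dict[int, set[int]] = {}
--     for i in range(n):
--         groups.setdefault(label[i], set()).add(i)
--     return [g for g in groups.values() if len(g) > 1]
-- ===== Notes on version B (the rewrite author's own statement) =====
-- stated objective: simpler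
-- what changed: Replaces the union-find forest (path-compressing find, union by root relinking, and a second find pass to key the groups dict) by a flat label array: each edge merges two classes by rewriting every occurrence of one label, and grouping just reads label[i]; no nested helper functions and no mutation threading.
import Mathlib
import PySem

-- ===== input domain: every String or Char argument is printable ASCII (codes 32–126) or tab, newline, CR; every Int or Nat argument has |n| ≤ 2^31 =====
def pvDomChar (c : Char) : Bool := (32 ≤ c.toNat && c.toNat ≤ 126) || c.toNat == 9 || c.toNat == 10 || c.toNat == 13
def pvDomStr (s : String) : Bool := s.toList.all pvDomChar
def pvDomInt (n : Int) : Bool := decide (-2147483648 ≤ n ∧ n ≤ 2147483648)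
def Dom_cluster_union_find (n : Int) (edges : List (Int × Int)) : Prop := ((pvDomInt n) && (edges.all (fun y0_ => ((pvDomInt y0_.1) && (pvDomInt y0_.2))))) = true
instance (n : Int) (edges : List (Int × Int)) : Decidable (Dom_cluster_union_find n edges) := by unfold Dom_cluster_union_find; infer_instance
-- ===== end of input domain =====

-- B replaces A's path-compressing union-find forest by a flat label array that is
-- rewritten wholesale at each edge (objective: simpler — no find/union helpers, no
-- mutation threading).  A mutates no caller-visible argument; equivalence is about
-- the return value.

-- ===== PORT A =====
-- `find`: while parent[x] != x: parent[x] = parent[parent[x]]; x = parent[x]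
-- (fuel-guarded structural recursion; fuel = len(parent) suffices on every input
-- admitted by Pre_, proved below)
def pvFind : Nat → List Int → Int → List Int × Int
  | 0, p, x => (p, x)
  | fuel+1, p, x =>
    let px := (PySem.List.pyGet? p x).getD x
    if px = x then (p, x)
    else
      let ppx := (PySem.List.pyGet? p px).getD px
      pvFind fuel (PySem.List.pySetD p x ppx) ppx

-- `union`: ra, rb = find(a), find(b); if ra != rb: parent[rb] = ra
def pvUnion (p : List Int) (a b : Int) : List Int :=
  let fa := pvFind p.length p a
  let fb := pvFind fa.1.length fa.1 b
  if fa.2 ≠ fb.2 then PySem.List.pySetD fb.1 fb.2 fa.2 else fb.1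

def cluster_union_find (n : Int) (edges : List (Int × Int)) : List (List Int) :=
  let parent := edges.foldl (fun p e => pvUnion p e.1 e.2) (PySem.List.pyRange 0 n 1)
  let st := (PySem.List.pyRange 0 n 1).foldl
    (fun (st : List Int × PySem.Dict Int (PySem.Set Int)) i =>
      let f := pvFind st.1.length st.1 i
      (f.1, st.2.modify f.2 PySem.Set.empty (fun s => PySem.Set.add s i)))
    (parent, PySem.Dict.empty)
  st.2.values.filter (fun g => 1 < g.length)

-- ===== PORT B =====
def cluster_union_find_alt (n : Int) (edges : List (Int × Int)) : List (List Int) :=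
  let label := edges.foldl (fun lab e =>
      let la := (PySem.List.pyGet? lab e.1).getD 0
      let lb := (PySem.List.pyGet? lab e.2).getD 0
      if la ≠ lb then lab.map (fun x => if x = lb then la else x) else lab)
    (PySem.List.pyRange 0 n 1)
  let groups := (PySem.List.pyRange 0 n 1).foldl
    (fun (d : PySem.Dict Int (PySem.Set Int)) i =>
      d.modify ((PySem.List.pyGet? label i).getD 0) PySem.Set.empty (fun s => PySem.Set.add s i))
    PySem.Dict.empty
  groups.values.filter (fun g => 1 < g.length)

-- ===== PRECONDITION & SPEC =====
-- Pre_ = exactly the inputs where A returns: every edge endpoint is a valid Python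
-- index into the n-element parent list (−n ≤ e < n, Python's negative indices wrap);
-- outside it A (and B) raise IndexError.
def Pre_cluster_union_find (n : Int) (edges : List (Int × Int)) : Prop :=
  ∀ e ∈ edges, (-n ≤ e.1 ∧ e.1 < n) ∧ (-n ≤ e.2 ∧ e.2 < n)
instance (n : Int) (edges : List (Int × Int)) : Decidable (Pre_cluster_union_find n edges) := by
  unfold Pre_cluster_union_find; infer_instance

def pvWitness_cluster_union_find : Int × (List (Int × Int)) := (5, [(0, 1), (3, 1), (-1, 2)])

def Spec_cluster_union_find (n : Int) (edges : List (Int × Int)) (out : List (List Int)) : Prop := out = cluster_union_find_alt n edges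
instance (n : Int) (edges : List (Int × Int)) (out : List (List Int)) : Decidable (Spec_cluster_union_find n edges out) := by unfold Spec_cluster_union_find; infer_instance

-- ===== CLAIM (what is proved, stated in full; the proofs are below) =====
def Claim_equal_cluster_union_find : Prop := ∀ (n : Int) (edges : List (Int × Int)), Dom_cluster_union_find n edges → Pre_cluster_union_find n edges → Spec_cluster_union_find n edges (cluster_union_find n edges)

-- ===== LEMMAS AND PROOFS =====

-- ---- abstract view of the parent array ----
def pvStep (p : List Int) (k : Nat) : Nat := (p.getD k 0).toNat
def pvWf (p : List Int) : Prop := ∀ k, k < p.length → p.getD k 0 = ((pvStep p k : Nat) : Int) ∧ pvStep p k < p.length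
def pvRoot (p : List Int) (k r : Nat) : Prop := (∃ m, (pvStep p)^[m] k = r) ∧ pvStep p r = r
def pvAcyc (p : List Int) : Prop := ∀ k, k < p.length → ∃ r, pvRoot p k r
def pvSame (p : List Int) (i j : Nat) : Prop := ∃ r, pvRoot p i r ∧ pvRoot p j r
def pvWrap (len : Nat) (x : Int) : Nat := if x < 0 then (x + len).toNat else x.toNat
def pvMerge (R : Nat → Nat → Prop) (a b i j : Nat) : Prop := R i j ∨ (R i a ∧ R j b) ∨ (R i b ∧ R j a)

-- ---- generic grouping machinery ----
def pvGDict (c : Nat → Int) (n' : Nat) : PySem.Dict Int (PySem.Set Int) :=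
  (List.range n').foldl (fun d k => d.modify (c k) PySem.Set.empty (fun s => PySem.Set.add s (k : Int))) PySem.Dict.empty
def pvIsRep (c : Nat → Int) (t : Nat) : Bool := decide (∀ s, s < t → c s ≠ c t)
def pvReps (c : Nat → Int) (n' : Nat) : List Nat := (List.range n').filter (pvIsRep c)
def pvBucket (c : Nat → Int) (n' t : Nat) : List Int :=
  ((List.range n').filter (fun j => c j = c t)).map (fun (j : Nat) => (j : Int))


-- ---- basic facts about step / roots ----
theorem pvStep_lt {p : List Int} (hw : pvWf p) {k : Nat} (hk : k < p.length) : pvStep p k < p.length := (hw k hk).2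

theorem pvIter_lt {p : List Int} (hw : pvWf p) : ∀ (m : Nat) {k : Nat}, k < p.length → (pvStep p)^[m] k < p.length := by
  intro m
  induction m with
  | zero => intro k hk; simpa using hk
  | succ m ih => intro k hk; rw [Function.iterate_succ_apply]; exact ih (pvStep_lt hw hk)

theorem pvIter_stable {p : List Int} {k r m : Nat} (hm : (pvStep p)^[m] k = r) (hf : pvStep p r = r) :
    ∀ m', m ≤ m' → (pvStep p)^[m'] k = r := by
  intro m' hle
  have h := Function.iterate_add_apply (pvStep p) (m' - m) m k
  rw [Nat.sub_add_cancel hle] at h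
  rw [h, hm, Function.iterate_fixed hf]

theorem pvRoot_unique {p : List Int} {k r r' : Nat} (h1 : pvRoot p k r) (h2 : pvRoot p k r') : r = r' := by
  obtain ⟨⟨m1, hm1⟩, hf1⟩ := h1
  obtain ⟨⟨m2, hm2⟩, hf2⟩ := h2
  have h1' := pvIter_stable hm1 hf1 (max m1 m2) (le_max_left _ _)
  have h2' := pvIter_stable hm2 hf2 (max m1 m2) (le_max_right _ _)
  rw [h1'] at h2'; exact h2'

theorem pvRoot_fix {p : List Int} {r : Nat} (h : pvStep p r = r) : pvRoot p r r := ⟨⟨0, rfl⟩, h⟩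

theorem pvRoot_of_fix_eq {p : List Int} {k r : Nat} (hk : pvStep p k = k) (h : pvRoot p k r) : r = k := by
  obtain ⟨⟨m, hm⟩, _⟩ := h
  rw [Function.iterate_fixed hk] at hm
  omega

-- pigeonhole: a minimal witness is shorter than the array
theorem pvRoot_bound {p : List Int} {k r : Nat} (hw : pvWf p) (hk : k < p.length) (h : pvRoot p k r) :
    ∃ m, m < p.length ∧ (pvStep p)^[m] k = r := by
  classical
  obtain ⟨hex, hf⟩ := h
  have hm : (pvStep p)^[Nat.find hex] k = r := Nat.find_spec hex
  by_cases hlt : Nat.find hex < p.length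
  · exact ⟨Nat.find hex, hlt, hm⟩
  · exfalso
    rw [not_lt] at hlt
    set m := Nat.find hex with hmdef
    have hmaps : ∀ s ∈ Finset.range (m + 1), (pvStep p)^[s] k ∈ Finset.range p.length := by
      intro s _
      exact Finset.mem_range.mpr (pvIter_lt hw s hk)
    obtain ⟨i, hi, j, hj, hij, heq⟩ :=
      Finset.exists_ne_map_eq_of_card_lt_of_maps_to (by simp; omega) hmaps
    rw [Finset.mem_range] at hi hj
    -- wlog i < j
    rcases Nat.lt_or_ge i j with hlt2 | hge
    · have hshort : (pvStep p)^[m - j + i] k = r := by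
        have : (pvStep p)^[m - j + j] k = r := by rw [Nat.sub_add_cancel (by omega)]; exact hm
        rw [Function.iterate_add_apply] at this ⊢
        rw [heq]
        exact this
      exact absurd hshort (Nat.find_min hex (by omega))
    · have hlt2 : j < i := lt_of_le_of_ne hge (fun hh => hij hh.symm)
      have hshort : (pvStep p)^[m - i + j] k = r := by
        have : (pvStep p)^[m - i + i] k = r := by rw [Nat.sub_add_cancel (by omega)]; exact hm
        rw [Function.iterate_add_apply] at this ⊢
        rw [← heq]
        exact this
      exact absurd hshort (Nat.find_min hex (by omega))

-- ---- getD/set bookkeeping ----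
theorem pvGetD_set_self {p : List Int} {x : Nat} (hx : x < p.length) (v : Int) :
    (p.set x v).getD x 0 = v := by
  rw [List.getD_eq_getElem?_getD, List.getElem?_set_self (by simpa using hx)]
  rfl

theorem pvGetD_set_ne {p : List Int} {x y : Nat} (v : Int) (h : y ≠ x) :
    (p.set x v).getD y 0 = p.getD y 0 := by
  rw [List.getD_eq_getElem?_getD, List.getElem?_set_ne (fun hh => h hh.symm), ← List.getD_eq_getElem?_getD]

theorem pvStep_set_ne {p : List Int} {x y : Nat} (v : Int) (h : y ≠ x) :
    pvStep (p.set x v) y = pvStep p y := by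
  unfold pvStep; rw [pvGetD_set_ne v h]

theorem pvStep_set_self {p : List Int} {x g : Nat} (hx : x < p.length) :
    pvStep (p.set x ((g : Nat) : Int)) x = g := by
  unfold pvStep; rw [pvGetD_set_self hx]; simp

theorem pvWf_set {p : List Int} {x g : Nat} (hw : pvWf p) (hx : x < p.length) (hg : g < p.length) :
    pvWf (p.set x ((g : Nat) : Int)) := by
  intro k hk
  rw [List.length_set] at hk
  by_cases hkx : k = x
  · subst hkx
    constructor
    · rw [pvGetD_set_self hx]; rw [pvStep_set_self hx]
    · rw [pvStep_set_self hx]; simpa using hg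
  · rw [List.length_set]
    constructor
    · rw [pvGetD_set_ne _ hkx, pvStep_set_ne _ hkx]; exact (hw k hk).1
    · rw [pvStep_set_ne _ hkx]; exact (hw k hk).2

theorem pvSet_self_eq {p : List Int} {x : Nat} (hx : x < p.length) (hv : p.getD x 0 = v) :
    p.set x v = p := by
  apply List.ext_getElem
  · simp
  · intro i h1 h2
    rw [List.getElem_set]
    split
    · next h => subst h; rw [List.getD_eq_getElem?_getD, List.getElem?_eq_getElem h2] at hv; simpa using hv.symm
    · rfl


-- ---- path compression preserves every root ----
theorem pvCompress_fwd {p : List Int} {x : Nat} (hx : x < p.length) (hnf : pvStep p x ≠ x) :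
    ∀ m k r, (pvStep p)^[m] k = r → pvStep p r = r →
      ∃ m' ≤ m, (pvStep (p.set x ((pvStep p (pvStep p x) : Nat) : Int)))^[m'] k = r := by
  intro m
  induction m using Nat.strong_induction_on with
  | h m ih =>
    intro k r hm hf
    by_cases hkfix : pvStep p k = k
    · have hrk : r = k := pvRoot_of_fix_eq hkfix ⟨⟨m, hm⟩, hf⟩
      exact ⟨0, Nat.zero_le _, by simpa using hrk.symm⟩
    · -- k is not a fixpoint, so m ≥ 1
      cases m with
      | zero => simp only [Function.iterate_zero, id_eq] at hm; subst hm; exact absurd hf hkfix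
      | succ m2 =>
        rw [Function.iterate_succ_apply] at hm
        by_cases hkx : k = x
        · subst hkx
          cases m2 with
          | zero =>
            -- step x = r is the root; the new parent of x is step(step x) = step r = r
            simp only [Function.iterate_zero, id_eq] at hm
            refine ⟨1, by omega, ?_⟩
            simp only [Function.iterate_one]
            rw [pvStep_set_self hx, hm, hf]
          | succ m3 =>
            rw [Function.iterate_succ_apply] at hm
            obtain ⟨m', hm'le, hm'⟩ := ih m3 (by omega) _ r hm hf
            refine ⟨m' + 1, by omega, ?_⟩
            rw [Function.iterate_succ_apply, pvStep_set_self hx]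
            exact hm'
        · obtain ⟨m', hm'le, hm'⟩ := ih m2 (by omega) _ r hm hf
          refine ⟨m' + 1, by omega, ?_⟩
          rw [Function.iterate_succ_apply, pvStep_set_ne _ hkx]
          exact hm'

theorem pvCompress_fix {p : List Int} {x r : Nat} (hnf : pvStep p x ≠ x) (hf : pvStep p r = r) (v : Int) :
    pvStep (p.set x v) r = r := by
  have hrx : r ≠ x := fun h => hnf (h ▸ hf)
  rw [pvStep_set_ne _ hrx]; exact hf

theorem pvCompress_root {p : List Int} {x : Nat} (hx : x < p.length) (hnf : pvStep p x ≠ x)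
    {k r : Nat} (h : pvRoot p k r) :
    pvRoot (p.set x ((pvStep p (pvStep p x) : Nat) : Int)) k r := by
  obtain ⟨⟨m, hm⟩, hf⟩ := h
  obtain ⟨m', _, hm'⟩ := pvCompress_fwd hx hnf m k r hm hf
  exact ⟨⟨m', hm'⟩, pvCompress_fix hnf hf _⟩

theorem pvCompress_root_iff {p : List Int} {x : Nat} (hx : x < p.length) (hnf : pvStep p x ≠ x)
    (hacyc : pvAcyc p) {k : Nat} (hk : k < p.length) (r : Nat) :
    pvRoot (p.set x ((pvStep p (pvStep p x) : Nat) : Int)) k r ↔ pvRoot p k r := by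
  obtain ⟨r0, hr0⟩ := hacyc k hk
  have h1 := pvCompress_root hx hnf hr0
  constructor
  · intro h2
    rwa [pvRoot_unique h2 h1]
  · intro h2
    rwa [pvRoot_unique hr0 h2] at h1

theorem pvCompress_acyc {p : List Int} {x : Nat} (hx : x < p.length) (hnf : pvStep p x ≠ x)
    (hacyc : pvAcyc p) :
    pvAcyc (p.set x ((pvStep p (pvStep p x) : Nat) : Int)) := by
  intro k hk
  rw [List.length_set] at hk
  obtain ⟨r0, hr0⟩ := hacyc k hk
  exact ⟨r0, pvCompress_root hx hnf hr0⟩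

-- ---- linking one root under another ----
theorem pvLink_root {p : List Int} {ra rb : Nat} (hrb : rb < p.length)
    (hfa : pvStep p ra = ra) (hfb : pvStep p rb = rb) (hne : ra ≠ rb) :
    ∀ m k r, (pvStep p)^[m] k = r → pvStep p r = r →
      pvRoot (p.set rb ((ra : Nat) : Int)) k (if r = rb then ra else r) := by
  have hfa' : pvStep (p.set rb ((ra : Nat) : Int)) ra = ra := by
    rw [pvStep_set_ne _ hne]; exact hfa
  have hstepb : pvStep (p.set rb ((ra : Nat) : Int)) rb = ra := pvStep_set_self hrb
  intro m
  induction m with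
  | zero =>
    intro k r hm hf
    simp only [Function.iterate_zero, id_eq] at hm
    subst hm
    by_cases hkb : k = rb
    · subst hkb
      simp only [if_pos rfl]
      exact ⟨⟨1, by simpa using hstepb⟩, hfa'⟩
    · rw [if_neg hkb]
      refine pvRoot_fix ?_
      rw [pvStep_set_ne _ hkb]; exact hf
  | succ m ih =>
    intro k r hm hf
    rw [Function.iterate_succ_apply] at hm
    by_cases hkfix : pvStep p k = k
    · have : (pvStep p)^[m] k = r := by rw [← hm]; rw [hkfix]
      have hrk : r = k := pvRoot_of_fix_eq hkfix ⟨⟨m, this⟩, hf⟩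
      subst hrk
      by_cases hkb : r = rb
      · subst hkb
        simp only [if_pos rfl]
        exact ⟨⟨1, by simpa using hstepb⟩, hfa'⟩
      · rw [if_neg hkb]
        refine pvRoot_fix ?_
        rw [pvStep_set_ne _ hkb]; exact hkfix
    · have hkb : k ≠ rb := fun h => hkfix (h ▸ hfb)
      have := ih _ r hm hf
      obtain ⟨⟨m', hm'⟩, hf'⟩ := this
      refine ⟨⟨m' + 1, ?_⟩, hf'⟩
      rw [Function.iterate_succ_apply, pvStep_set_ne _ hkb]
      exact hm'

theorem pvLink_root_of {p : List Int} {ra rb : Nat} (hrb : rb < p.length)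
    (hfa : pvStep p ra = ra) (hfb : pvStep p rb = rb) (hne : ra ≠ rb)
    {k r : Nat} (h : pvRoot p k r) :
    pvRoot (p.set rb ((ra : Nat) : Int)) k (if r = rb then ra else r) := by
  obtain ⟨⟨m, hm⟩, hf⟩ := h
  exact pvLink_root hrb hfa hfb hne m k r hm hf

theorem pvLink_acyc {p : List Int} {ra rb : Nat} (hrb : rb < p.length)
    (hfa : pvStep p ra = ra) (hfb : pvStep p rb = rb) (hne : ra ≠ rb)
    (hacyc : pvAcyc p) :
    pvAcyc (p.set rb ((ra : Nat) : Int)) := by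
  intro k hk
  rw [List.length_set] at hk
  obtain ⟨r0, hr0⟩ := hacyc k hk
  exact ⟨_, pvLink_root_of hrb hfa hfb hne hr0⟩


-- ---- find computes the root and preserves all roots ----
theorem pvGet_nat {p : List Int} (hw : pvWf p) {k : Nat} (hk : k < p.length) (d : Int) :
    (PySem.List.pyGet? p ((k : Nat) : Int)).getD d = ((pvStep p k : Nat) : Int) := by
  rw [PySem.List.pyGet?_natCast, List.getElem?_eq_getElem hk]
  have := (hw k hk).1
  rw [List.getD_eq_getElem?_getD, List.getElem?_eq_getElem hk] at this
  simpa using this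

theorem pvFind_spec : ∀ (fuel : Nat) (p : List Int) (k r m : Nat),
    pvWf p → pvAcyc p → k < p.length →
    (pvStep p)^[m] k = r → pvStep p r = r → m ≤ fuel →
    (pvFind fuel p ((k : Nat) : Int)).1.length = p.length ∧
    (pvFind fuel p ((k : Nat) : Int)).2 = ((r : Nat) : Int) ∧
    pvWf (pvFind fuel p ((k : Nat) : Int)).1 ∧
    pvAcyc (pvFind fuel p ((k : Nat) : Int)).1 ∧
    (∀ k' r', k' < p.length → (pvRoot (pvFind fuel p ((k : Nat) : Int)).1 k' r' ↔ pvRoot p k' r')) := by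
  intro fuel
  induction fuel with
  | zero =>
    intro p k r m hw hacyc hk hm hf hle
    interval_cases m
    simp only [Function.iterate_zero, id_eq] at hm
    subst hm
    exact ⟨rfl, rfl, hw, hacyc, fun _ _ _ => Iff.rfl⟩
  | succ fuel ih =>
    intro p k r m hw hacyc hk hm hf hle
    by_cases hkfix : pvStep p k = k
    · have hrk : r = k := pvRoot_of_fix_eq hkfix ⟨⟨m, hm⟩, hf⟩
      have hpx : (PySem.List.pyGet? p ((k : Nat) : Int)).getD ((k : Nat) : Int) = ((k : Nat) : Int) := by
        rw [pvGet_nat hw hk, hkfix]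
      have heq : pvFind (fuel + 1) p ((k : Nat) : Int) = (p, ((k : Nat) : Int)) := by
        simp only [pvFind, hpx]
        simp
      rw [heq]
      exact ⟨rfl, by rw [hrk], hw, hacyc, fun _ _ _ => Iff.rfl⟩
    · -- one compression step
      cases m with
      | zero =>
        simp only [Function.iterate_zero, id_eq] at hm
        subst hm; exact absurd hf hkfix
      | succ m2 =>
        rw [Function.iterate_succ_apply] at hm
        have hs : pvStep p k < p.length := pvStep_lt hw hk
        have hss : pvStep p (pvStep p k) < p.length := pvStep_lt hw hs
        have hpx : (PySem.List.pyGet? p ((k : Nat) : Int)).getD ((k : Nat) : Int)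
            = ((pvStep p k : Nat) : Int) := pvGet_nat hw hk _
        have hppx : (PySem.List.pyGet? p ((pvStep p k : Nat) : Int)).getD ((pvStep p k : Nat) : Int)
            = ((pvStep p (pvStep p k) : Nat) : Int) := pvGet_nat hw hs _
        have hcond : ¬ ((pvStep p k : Nat) : Int) = ((k : Nat) : Int) := by
          simpa using hkfix
        have hset : PySem.List.pySetD p ((k : Nat) : Int) ((pvStep p (pvStep p k) : Nat) : Int)
            = p.set k ((pvStep p (pvStep p k) : Nat) : Int) := by
          rw [PySem.List.pySetD_natCast]
        have heq : pvFind (fuel + 1) p ((k : Nat) : Int)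
            = pvFind fuel (p.set k ((pvStep p (pvStep p k) : Nat) : Int)) ((pvStep p (pvStep p k) : Nat) : Int) := by
          simp only [pvFind, hpx, if_neg hcond, hppx, hset]
        set p1 := p.set k ((pvStep p (pvStep p k) : Nat) : Int) with hp1
        have hlen1 : p1.length = p.length := by rw [hp1, List.length_set]
        have hw1 : pvWf p1 := pvWf_set hw hk hss
        have hacyc1 : pvAcyc p1 := pvCompress_acyc hk hkfix hacyc
        -- a witness for the grandparent, of size ≤ m2
        have hgw : ∃ mg ≤ m2, (pvStep p)^[mg] (pvStep p (pvStep p k)) = r := by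
          cases m2 with
          | zero =>
            simp only [Function.iterate_zero, id_eq] at hm
            exact ⟨0, le_refl _, by simp [hm, hf]⟩
          | succ m3 =>
            rw [Function.iterate_succ_apply] at hm
            exact ⟨m3, by omega, hm⟩
        obtain ⟨mg, hmgle, hmg⟩ := hgw
        obtain ⟨m', hm'le, hm'⟩ := pvCompress_fwd hk hkfix mg _ r hmg hf
        have hf1 : pvStep p1 r = r := pvCompress_fix hkfix hf _
        have := ih p1 (pvStep p (pvStep p k)) r m' hw1 hacyc1 (by rw [hlen1]; exact hss) hm' hf1 (by omega)
        rw [heq]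
        refine ⟨by rw [this.1, hlen1], this.2.1, this.2.2.1, this.2.2.2.1, ?_⟩
        intro k' r' hk'
        rw [this.2.2.2.2 k' r' (by rw [hlen1]; exact hk')]
        exact pvCompress_root_iff hk hkfix hacyc hk' r'


theorem pvFind_fix {p : List Int} (hw : pvWf p) {k : Nat} (hk : k < p.length)
    (hfix : pvStep p k = k) : ∀ fuel, pvFind fuel p ((k : Nat) : Int) = (p, ((k : Nat) : Int)) := by
  intro fuel
  cases fuel with
  | zero => rfl
  | succ fuel =>
    have hpx : (PySem.List.pyGet? p ((k : Nat) : Int)).getD ((k : Nat) : Int) = ((k : Nat) : Int) := by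
      rw [pvGet_nat hw hk, hfix]
    simp only [pvFind, hpx]
    simp

-- Python's negative-index wraparound: find(x) for -len ≤ x < 0 equals find(x+len)
theorem pvGet_neg {p : List Int} (hw : pvWf p) {x : Int} (hx0 : x < 0) (hxr : -(p.length : Int) ≤ x) (d : Int) :
    (PySem.List.pyGet? p x).getD d = ((pvStep p (pvWrap p.length x) : Nat) : Int) := by
  have hk : pvWrap p.length x < p.length := by unfold pvWrap; split <;> omega
  have hidx : PySem.List.pyIdx? p.length x = some (pvWrap p.length x) := by
    unfold PySem.List.pyIdx? pvWrap
    rw [if_neg (by omega), if_pos hxr, if_pos hx0]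
    congr 1
    omega
  unfold PySem.List.pyGet?
  rw [hidx]
  simp only [Option.bind_some, List.getElem?_eq_getElem hk, Option.getD_some]
  have := (hw _ hk).1
  rw [List.getD_eq_getElem?_getD, List.getElem?_eq_getElem hk] at this
  simpa using this

theorem pvSetD_neg {p : List Int} {x : Int} (hx0 : x < 0) (hxr : -(p.length : Int) ≤ x) (v : Int) :
    PySem.List.pySetD p x v = p.set (pvWrap p.length x) v := by
  have hidx : PySem.List.pyIdx? p.length x = some (pvWrap p.length x) := by
    unfold PySem.List.pyIdx? pvWrap
    rw [if_neg (by omega), if_pos hxr, if_pos hx0]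
    congr 1
    omega
  unfold PySem.List.pySetD PySem.List.pySet?
  rw [hidx]
  rfl

theorem pvFind_neg {p : List Int} (hw : pvWf p) {x : Int} (hx0 : x < 0) (hxr : -(p.length : Int) ≤ x) :
    pvFind p.length p x = pvFind p.length p ((pvWrap p.length x : Nat) : Int) := by
  set kx := pvWrap p.length x with hkx
  have hk : kx < p.length := by rw [hkx]; unfold pvWrap; split <;> omega
  obtain ⟨L, hL⟩ : ∃ L, p.length = L + 1 := ⟨p.length - 1, by omega⟩
  have hpx : (PySem.List.pyGet? p x).getD x = ((pvStep p kx : Nat) : Int) := pvGet_neg hw hx0 hxr x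
  have hcond : ¬ ((pvStep p kx : Nat) : Int) = x := by
    have : (0 : Int) ≤ ((pvStep p kx : Nat) : Int) := by positivity
    omega
  have hppx : (PySem.List.pyGet? p ((pvStep p kx : Nat) : Int)).getD ((pvStep p kx : Nat) : Int)
      = ((pvStep p (pvStep p kx) : Nat) : Int) := pvGet_nat hw (pvStep_lt hw hk) _
  have hset : PySem.List.pySetD p x ((pvStep p (pvStep p kx) : Nat) : Int)
      = p.set kx ((pvStep p (pvStep p kx) : Nat) : Int) := pvSetD_neg hx0 hxr _
  have hunfold : pvFind p.length p x
      = pvFind L (p.set kx ((pvStep p (pvStep p kx) : Nat) : Int)) ((pvStep p (pvStep p kx) : Nat) : Int) := by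
    rw [hL]
    simp only [pvFind, hpx, if_neg hcond, hppx, hset]
  by_cases hfix : pvStep p kx = kx
  · rw [pvFind_fix hw hk hfix, hunfold, hfix, hfix]
    have hself : p.set kx ((kx : Nat) : Int) = p := by
      refine pvSet_self_eq hk ?_
      have := (hw _ hk).1
      rw [this, hfix]
    rw [hself]
    exact pvFind_fix hw hk hfix L
  · have hpxk : (PySem.List.pyGet? p ((kx : Nat) : Int)).getD ((kx : Nat) : Int)
        = ((pvStep p kx : Nat) : Int) := pvGet_nat hw hk _
    have hcond2 : ¬ ((pvStep p kx : Nat) : Int) = ((kx : Nat) : Int) := by simpa using hfix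
    have hset2 : PySem.List.pySetD p ((kx : Nat) : Int) ((pvStep p (pvStep p kx) : Nat) : Int)
        = p.set kx ((pvStep p (pvStep p kx) : Nat) : Int) := by rw [PySem.List.pySetD_natCast]
    rw [hunfold, hL]
    simp only [pvFind, hpxk, if_neg hcond2, hppx, hset2]

-- ---- the canonical root function ----
def pvRootC (p : List Int) (k : Nat) : Nat := (pvStep p)^[p.length] k

theorem pvRootC_root {p : List Int} (hw : pvWf p) (hacyc : pvAcyc p) {k : Nat} (hk : k < p.length) :
    pvRoot p k (pvRootC p k) := by
  obtain ⟨r, hr⟩ := hacyc k hk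
  obtain ⟨m, hmlt, hm⟩ := pvRoot_bound hw hk hr
  have : (pvStep p)^[p.length] k = r := pvIter_stable hm hr.2 _ (by omega)
  unfold pvRootC
  rw [this]
  exact hr

theorem pvRootC_eq {p : List Int} (hw : pvWf p) (hacyc : pvAcyc p) {k r : Nat} (hk : k < p.length)
    (h : pvRoot p k r) : pvRootC p k = r :=
  pvRoot_unique (pvRootC_root hw hacyc hk) h

-- ---- pvSame toolkit ----
theorem pvSame_iff_rootC {p : List Int} (hw : pvWf p) (hacyc : pvAcyc p) {i j : Nat}
    (hi : i < p.length) (hj : j < p.length) :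
    pvSame p i j ↔ pvRootC p i = pvRootC p j := by
  constructor
  · rintro ⟨r, h1, h2⟩
    rw [pvRootC_eq hw hacyc hi h1, pvRootC_eq hw hacyc hj h2]
  · intro h
    exact ⟨pvRootC p j, h ▸ pvRootC_root hw hacyc hi, pvRootC_root hw hacyc hj⟩

theorem pvSame_symm {p : List Int} {i j : Nat} (h : pvSame p i j) : pvSame p j i := by
  obtain ⟨r, h1, h2⟩ := h; exact ⟨r, h2, h1⟩

theorem pvSame_trans {p : List Int} {i j k : Nat} (h1 : pvSame p i j) (h2 : pvSame p j k) :
    pvSame p i k := by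
  obtain ⟨r, ha, hb⟩ := h1
  obtain ⟨r', hc, hd⟩ := h2
  rw [pvRoot_unique hb hc] at ha
  exact ⟨r', ha, hd⟩

theorem pvMerge_collapse {R : Nat → Nat → Prop} {a b i j : Nat}
    (hsymm : ∀ {u v}, R u v → R v u) (htrans : ∀ {u v w}, R u v → R v w → R u w)
    (hab : R a b) : pvMerge R a b i j ↔ R i j := by
  constructor
  · rintro (h | ⟨h1, h2⟩ | ⟨h1, h2⟩)
    · exact h
    · exact htrans (htrans h1 hab) (hsymm h2)
    · exact htrans (htrans h1 (hsymm hab)) (hsymm h2)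
  · intro h; exact Or.inl h

theorem pvSubst_eq_iff {α : Type} [DecidableEq α] {la lb v w : α} (hne : la ≠ lb) :
    ((if v = lb then la else v) = (if w = lb then la else w))
      ↔ (v = w ∨ (v = la ∧ w = lb) ∨ (v = lb ∧ w = la)) := by
  split_ifs with h1 h2 h2 <;> constructor <;> intro h <;> subst_eqs <;> tauto


theorem pvRoot_lt {p : List Int} (hw : pvWf p) {k r : Nat} (hk : k < p.length) (h : pvRoot p k r) :
    r < p.length := by
  obtain ⟨⟨m, hm⟩, _⟩ := h
  rw [← hm]
  exact pvIter_lt hw m hk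

theorem pvSame_congr {p q : List Int} (hiff : ∀ k' r', k' < p.length → (pvRoot q k' r' ↔ pvRoot p k' r'))
    {i j : Nat} (hi : i < p.length) (hj : j < p.length) :
    pvSame q i j ↔ pvSame p i j := by
  constructor
  · rintro ⟨r, h1, h2⟩
    exact ⟨r, (hiff i r hi).mp h1, (hiff j r hj).mp h2⟩
  · rintro ⟨r, h1, h2⟩
    exact ⟨r, (hiff i r hi).mpr h1, (hiff j r hj).mpr h2⟩

theorem pvWrap_lt {N : Nat} {x : Int} (h1 : -(N : Int) ≤ x) (h2 : x < (N : Int)) :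
    pvWrap N x < N := by
  unfold pvWrap; split <;> omega

theorem pvFindI_spec {p : List Int} (hw : pvWf p) (hacyc : pvAcyc p) {x : Int}
    (h1 : -(p.length : Int) ≤ x) (h2 : x < (p.length : Int)) :
    ∃ p', pvFind p.length p x = (p', ((pvRootC p (pvWrap p.length x) : Nat) : Int)) ∧
      p'.length = p.length ∧ pvWf p' ∧ pvAcyc p' ∧
      (∀ k' r', k' < p.length → (pvRoot p' k' r' ↔ pvRoot p k' r')) := by
  set k := pvWrap p.length x with hkdef
  have hk : k < p.length := pvWrap_lt h1 h2
  have hroot := pvRootC_root hw hacyc hk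
  obtain ⟨m, hmlt, hm⟩ := pvRoot_bound hw hk hroot
  have hspec := pvFind_spec p.length p k (pvRootC p k) m hw hacyc hk hm hroot.2 (by omega)
  have hx : pvFind p.length p x = pvFind p.length p ((k : Nat) : Int) := by
    by_cases hx0 : x < 0
    · exact pvFind_neg hw hx0 h1
    · have : ((k : Nat) : Int) = x := by rw [hkdef]; unfold pvWrap; rw [if_neg hx0]; omega
      rw [this]
  refine ⟨(pvFind p.length p ((k : Nat) : Int)).1, ?_, hspec.1, hspec.2.2.1, hspec.2.2.2.1, hspec.2.2.2.2⟩
  rw [hx, ← hspec.2.1]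

theorem pvUnion_spec {p : List Int} (hw : pvWf p) (hacyc : pvAcyc p) {a b : Int}
    (ha1 : -(p.length : Int) ≤ a) (ha2 : a < (p.length : Int))
    (hb1 : -(p.length : Int) ≤ b) (hb2 : b < (p.length : Int)) :
    (pvUnion p a b).length = p.length ∧ pvWf (pvUnion p a b) ∧ pvAcyc (pvUnion p a b) ∧
    ∀ i j, i < p.length → j < p.length →
      (pvSame (pvUnion p a b) i j ↔ pvMerge (pvSame p) (pvWrap p.length a) (pvWrap p.length b) i j) := by
  set ka := pvWrap p.length a with hkadef
  set kb := pvWrap p.length b with hkbdef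
  have hka : ka < p.length := pvWrap_lt ha1 ha2
  have hkb : kb < p.length := pvWrap_lt hb1 hb2
  set ra := pvRootC p ka with hradef
  set rb := pvRootC p kb with hrbdef
  have hRa : pvRoot p ka ra := pvRootC_root hw hacyc hka
  have hRb : pvRoot p kb rb := pvRootC_root hw hacyc hkb
  have hralt : ra < p.length := pvRoot_lt hw hka hRa
  have hrblt : rb < p.length := pvRoot_lt hw hkb hRb
  obtain ⟨p1, heq1, hlen1, hw1, hacyc1, hroots1⟩ := pvFindI_spec hw hacyc ha1 ha2
  have hb1' : -(p1.length : Int) ≤ b := by rw [hlen1]; exact hb1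
  have hb2' : b < (p1.length : Int) := by rw [hlen1]; exact hb2
  obtain ⟨p2, heq2, hlen2, hw2, hacyc2, hroots2⟩ := pvFindI_spec hw1 hacyc1 hb1' hb2'
  have hwrapb : pvWrap p1.length b = kb := by rw [hlen1, hkbdef]
  have hrbval : pvRootC p1 (pvWrap p1.length b) = rb := by
    rw [hwrapb]
    exact pvRootC_eq hw1 hacyc1 (by rw [hlen1]; exact hkb) ((hroots1 kb rb hkb).mpr hRb)
  have hlen2' : p2.length = p.length := by rw [hlen2, hlen1]
  have hroots12 : ∀ k' r', k' < p.length → (pvRoot p2 k' r' ↔ pvRoot p k' r') := by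
    intro k' r' hk'
    rw [hroots2 k' r' (by rw [hlen1]; exact hk')]
    exact hroots1 k' r' hk'
  have hunfold : pvUnion p a b
      = if ((ra : Nat) : Int) ≠ ((rb : Nat) : Int) then PySem.List.pySetD p2 ((rb : Nat) : Int) ((ra : Nat) : Int) else p2 := by
    unfold pvUnion
    rw [heq1]
    dsimp only
    rw [heq2]
    dsimp only
    rw [hrbval]
  by_cases hne : ra = rb
  · have : ¬ ((ra : Nat) : Int) ≠ ((rb : Nat) : Int) := by simp [hne]
    rw [hunfold, if_neg this]
    refine ⟨hlen2', hw2, hacyc2, ?_⟩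
    intro i j hi hj
    exact (pvSame_congr hroots12 hi hj).trans
      ((pvMerge_collapse (R := pvSame p) (a := ka) (b := kb)
        (fun {u v} h => pvSame_symm h) (fun {u v w} h1 h2 => pvSame_trans h1 h2)
        ⟨ra, hRa, by rw [hne]; exact hRb⟩).symm)
  · have hne' : ((ra : Nat) : Int) ≠ ((rb : Nat) : Int) := by simpa using hne
    rw [hunfold, if_pos hne', PySem.List.pySetD_natCast]
    set p3 := p2.set rb ((ra : Nat) : Int) with hp3
    have hfa2 : pvStep p2 ra = ra := ((hroots12 ra ra hralt).mpr (pvRoot_fix hRa.2)).2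
    have hfb2 : pvStep p2 rb = rb := ((hroots12 rb rb hrblt).mpr (pvRoot_fix hRb.2)).2
    have hrblt2 : rb < p2.length := by rw [hlen2']; exact hrblt
    have hralt2 : ra < p2.length := by rw [hlen2']; exact hralt
    refine ⟨by rw [hp3, List.length_set, hlen2'], pvWf_set hw2 hrblt2 hralt2,
      pvLink_acyc hrblt2 hfa2 hfb2 hne hacyc2, ?_⟩
    intro i j hi hj
    -- roots in p3 are the substituted roots of p2 (= of p)
    have hroot3 : ∀ k, k < p.length →
        pvRoot p3 k (if pvRootC p k = rb then ra else pvRootC p k) := by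
      intro k hkl
      have hrk : pvRoot p2 k (pvRootC p k) := (hroots12 k _ hkl).mpr (pvRootC_root hw hacyc hkl)
      exact pvLink_root_of hrblt2 hfa2 hfb2 hne hrk
    constructor
    · rintro ⟨r, hri, hrj⟩
      have h1 := pvRoot_unique hri (hroot3 i hi)
      have h2 := pvRoot_unique hrj (hroot3 j hj)
      rw [h1] at h2
      have := (pvSubst_eq_iff (α := Nat) hne).mp h2
      rcases this with h | ⟨hA, hB⟩ | ⟨hA, hB⟩
      · exact Or.inl ((pvSame_iff_rootC hw hacyc hi hj).mpr h)
      · refine Or.inr (Or.inl ⟨?_, ?_⟩)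
        · exact (pvSame_iff_rootC hw hacyc hi hka).mpr (by rw [hA])
        · exact (pvSame_iff_rootC hw hacyc hj hkb).mpr (by rw [hB])
      · refine Or.inr (Or.inr ⟨?_, ?_⟩)
        · exact (pvSame_iff_rootC hw hacyc hi hkb).mpr (by rw [hA])
        · exact (pvSame_iff_rootC hw hacyc hj hka).mpr (by rw [hB])
    · intro h
      have hsub : (if pvRootC p i = rb then ra else pvRootC p i)
          = (if pvRootC p j = rb then ra else pvRootC p j) := by
        apply (pvSubst_eq_iff (α := Nat) hne).mpr
        rcases h with h | ⟨hA, hB⟩ | ⟨hA, hB⟩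
        · exact Or.inl ((pvSame_iff_rootC hw hacyc hi hj).mp h)
        · exact Or.inr (Or.inl ⟨(pvSame_iff_rootC hw hacyc hi hka).mp hA,
            (pvSame_iff_rootC hw hacyc hj hkb).mp hB⟩)
        · exact Or.inr (Or.inr ⟨(pvSame_iff_rootC hw hacyc hi hkb).mp hA,
            (pvSame_iff_rootC hw hacyc hj hka).mp hB⟩)
      exact ⟨_, hroot3 i hi, hsub ▸ hroot3 j hj⟩


-- ---- the B side: one relabelling step merges the same two classes ----
theorem pvGetI {lab : List Int} {x : Int} (h1 : -(lab.length : Int) ≤ x) (h2 : x < (lab.length : Int)) (d : Int) :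
    (PySem.List.pyGet? lab x).getD d = lab.getD (pvWrap lab.length x) 0 := by
  have hk : pvWrap lab.length x < lab.length := pvWrap_lt h1 h2
  have hidx : PySem.List.pyIdx? lab.length x = some (pvWrap lab.length x) := by
    unfold PySem.List.pyIdx? pvWrap
    by_cases hx0 : x < 0
    · rw [if_neg (by omega), if_pos h1, if_pos hx0]
      congr 1
      omega
    · rw [if_pos (by omega), if_pos h2, if_neg hx0]
  unfold PySem.List.pyGet?
  rw [hidx]
  simp only [Option.bind_some, List.getElem?_eq_getElem hk, Option.getD_some,
    List.getD_eq_getElem?_getD, List.getElem?_eq_getElem hk]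

theorem pvGetD_map {f : Int → Int} {lab : List Int} {i : Nat} (hi : i < lab.length) :
    (lab.map f).getD i 0 = f (lab.getD i 0) := by
  rw [List.getD_eq_getElem?_getD, List.getD_eq_getElem?_getD,
    List.getElem?_eq_getElem (by simpa using hi), List.getElem?_eq_getElem hi]
  simp

theorem pvMerge_congr {R S : Nat → Nat → Prop} {N a b i j : Nat}
    (h : ∀ u v, u < N → v < N → (R u v ↔ S u v))
    (hA : a < N) (hB : b < N) (hi : i < N) (hj : j < N) :
    pvMerge R a b i j ↔ pvMerge S a b i j := by
  unfold pvMerge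
  rw [h i j hi hj, h i a hi hA, h j b hj hB, h i b hi hB, h j a hj hA]

-- ---- the invariant carried over the edge fold ----
theorem pvFold_inv (N : Nat) : ∀ (edges : List (Int × Int)) (p lab : List Int),
    (∀ e ∈ edges, (-(N : Int) ≤ e.1 ∧ e.1 < N) ∧ (-(N : Int) ≤ e.2 ∧ e.2 < N)) →
    p.length = N → lab.length = N → pvWf p → pvAcyc p →
    (∀ i j, i < N → j < N → (pvSame p i j ↔ lab.getD i 0 = lab.getD j 0)) →
    (edges.foldl (fun p e => pvUnion p e.1 e.2) p).length = N ∧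
    (edges.foldl (fun lab e =>
      let la := (PySem.List.pyGet? lab e.1).getD 0
      let lb := (PySem.List.pyGet? lab e.2).getD 0
      if la ≠ lb then lab.map (fun x => if x = lb then la else x) else lab) lab).length = N ∧
    pvWf (edges.foldl (fun p e => pvUnion p e.1 e.2) p) ∧
    pvAcyc (edges.foldl (fun p e => pvUnion p e.1 e.2) p) ∧
    (∀ i j, i < N → j < N →
      (pvSame (edges.foldl (fun p e => pvUnion p e.1 e.2) p) i j ↔
        (edges.foldl (fun lab e =>
          let la := (PySem.List.pyGet? lab e.1).getD 0
          let lb := (PySem.List.pyGet? lab e.2).getD 0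
          if la ≠ lb then lab.map (fun x => if x = lb then la else x) else lab) lab).getD i 0
        = (edges.foldl (fun lab e =>
          let la := (PySem.List.pyGet? lab e.1).getD 0
          let lb := (PySem.List.pyGet? lab e.2).getD 0
          if la ≠ lb then lab.map (fun x => if x = lb then la else x) else lab) lab).getD j 0)) := by
  intro edges
  induction edges with
  | nil =>
    intro p lab hpre hp hl hw hacyc hrel
    exact ⟨hp, hl, hw, hacyc, hrel⟩
  | cons e rest ih =>
    intro p lab hpre hp hl hw hacyc hrel
    obtain ⟨⟨ha1, ha2⟩, hb1, hb2⟩ := hpre e (List.mem_cons_self)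
    have ha1' : -(p.length : Int) ≤ e.1 := by rw [hp]; exact ha1
    have ha2' : e.1 < (p.length : Int) := by rw [hp]; exact ha2
    have hb1' : -(p.length : Int) ≤ e.2 := by rw [hp]; exact hb1
    have hb2' : e.2 < (p.length : Int) := by rw [hp]; exact hb2
    obtain ⟨hulen, huw, huacyc, hurel⟩ := pvUnion_spec hw hacyc ha1' ha2' hb1' hb2'
    rw [hp] at hulen
    set ka := pvWrap N e.1 with hkadef
    set kb := pvWrap N e.2 with hkbdef
    have hka : ka < N := pvWrap_lt ha1 ha2
    have hkb : kb < N := pvWrap_lt hb1 hb2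
    have hwrapa : pvWrap p.length e.1 = ka := by rw [hp]
    have hwrapb : pvWrap p.length e.2 = kb := by rw [hp]
    rw [hwrapa, hwrapb, hp] at hurel
    -- the relabelling step
    have hla : (PySem.List.pyGet? lab e.1).getD 0 = lab.getD ka 0 := by
      rw [pvGetI (by rw [hl]; exact ha1) (by rw [hl]; exact ha2), hl]
    have hlb : (PySem.List.pyGet? lab e.2).getD 0 = lab.getD kb 0 := by
      rw [pvGetI (by rw [hl]; exact hb1) (by rw [hl]; exact hb2), hl]
    set la := lab.getD ka 0 with hladef
    set lb := lab.getD kb 0 with hlbdef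
    set lab' := if la ≠ lb then lab.map (fun x => if x = lb then la else x) else lab with hlab'
    have hstepB : (let la := (PySem.List.pyGet? lab e.1).getD 0
        let lb := (PySem.List.pyGet? lab e.2).getD 0
        if la ≠ lb then lab.map (fun x => if x = lb then la else x) else lab) = lab' := by
      dsimp only
      rw [hla, hlb]
    have hl' : lab'.length = N := by
      rw [hlab']; split
      · rw [List.length_map]; exact hl
      · exact hl
    have hrel' : ∀ i j, i < N → j < N →
        (pvSame (pvUnion p e.1 e.2) i j ↔ lab'.getD i 0 = lab'.getD j 0) := by
      intro i j hi hj
      rw [hurel i j hi hj]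
      rw [pvMerge_congr (N := N) (fun u v hu hv => hrel u v hu hv) hka hkb hi hj]
      rw [hlab']
      by_cases hne : la ≠ lb
      · rw [if_pos hne]
        rw [pvGetD_map (by rw [hl]; exact hi), pvGetD_map (by rw [hl]; exact hj)]
        rw [pvSubst_eq_iff (α := Int) (fun h => hne h)]
        unfold pvMerge
        tauto
      · rw [if_neg hne]
        rw [not_not] at hne
        exact pvMerge_collapse (R := fun u v => lab.getD u 0 = lab.getD v 0)
          (fun h => h.symm) (fun h1 h2 => h1.trans h2) hne
    rw [List.foldl_cons, List.foldl_cons, hstepB]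
    exact ih (pvUnion p e.1 e.2) lab' (fun e' he' => hpre e' (List.mem_cons_of_mem _ he'))
      hulen hl' huw huacyc hrel'


-- ---- the grouping dict, in closed form ----
theorem pvReps_mem {c : Nat → Int} {n' t : Nat} :
    t ∈ pvReps c n' ↔ t < n' ∧ ∀ s, s < t → c s ≠ c t := by
  simp [pvReps, pvIsRep, List.mem_filter, List.mem_range]

theorem pvReps_class_inj {c : Nat → Int} {n' t t' : Nat}
    (ht : t ∈ pvReps c n') (ht' : t' ∈ pvReps c n') (h : c t = c t') : t = t' := by
  rw [pvReps_mem] at ht ht'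
  rcases Nat.lt_trichotomy t t' with hlt | heq | hlt
  · exact absurd h (ht'.2 t hlt)
  · exact heq
  · exact absurd h.symm (ht.2 t' hlt)

theorem pvReps_find {c : Nat → Int} {n' : Nat} :
    ∀ s, s < n' → ∃ t ∈ pvReps c n', c t = c s := by
  intro s
  induction s using Nat.strong_induction_on with
  | h s ih =>
    intro hs
    by_cases hrep : ∀ u, u < s → c u ≠ c s
    · exact ⟨s, pvReps_mem.mpr ⟨hs, hrep⟩, rfl⟩
    · push Not at hrep
      obtain ⟨u, hu, hcu⟩ := hrep
      obtain ⟨t, ht, hct⟩ := ih u hu (by omega)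
      exact ⟨t, ht, by rw [hct, hcu]⟩

theorem pvReps_keys_nodup {c : Nat → Int} {n' : Nat} : ((pvReps c n').map c).Nodup := by
  refine List.Nodup.map_on ?_ ?_
  · intro t ht t' ht' h
    exact pvReps_class_inj ht ht' h
  · exact (List.nodup_range).filter _

theorem pvReps_succ {c : Nat → Int} {n' : Nat} :
    pvReps c (n' + 1) = pvReps c n' ++ (if pvIsRep c n' then [n'] else []) := by
  unfold pvReps
  rw [List.range_succ, List.filter_append]
  congr 1
  by_cases h : pvIsRep c n'
  · rw [if_pos h]; simp [List.filter_cons, h]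
  · rw [if_neg h]; simp [List.filter_cons, h]

theorem pvBucket_succ {c : Nat → Int} {n' t : Nat} :
    pvBucket c (n' + 1) t = pvBucket c n' t ++ (if c n' = c t then [((n' : Nat) : Int)] else []) := by
  unfold pvBucket
  rw [List.range_succ, List.filter_append, List.map_append]
  congr 1
  by_cases h : c n' = c t
  · rw [if_pos h]; simp [List.filter_cons, h]
  · rw [if_neg h]; simp [List.filter_cons, h]

theorem pvBucket_not_mem {c : Nat → Int} {n' t : Nat} :
    ((n' : Nat) : Int) ∉ pvBucket c n' t := by
  unfold pvBucket
  simp only [List.mem_map, List.mem_filter, List.mem_range]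
  rintro ⟨j, ⟨hj, _⟩, hcast⟩
  omega

theorem pvBucket_nil_of_rep {c : Nat → Int} {n' : Nat} (h : ∀ s, s < n' → c s ≠ c n') :
    pvBucket c n' n' = [] := by
  unfold pvBucket
  rw [List.filter_eq_nil_iff.mpr, List.map_nil]
  intro j hj
  simp only [List.mem_range] at hj
  simpa using h j hj

theorem pvGDict_succ {c : Nat → Int} {n' : Nat} :
    pvGDict c (n' + 1) = (pvGDict c n').modify (c n') PySem.Set.empty (fun s => PySem.Set.add s ((n' : Nat) : Int)) := by
  unfold pvGDict
  rw [List.range_succ, List.foldl_append, List.foldl_cons, List.foldl_nil]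

theorem pvGDict_repr (c : Nat → Int) :
    ∀ n', pvGDict c n' = PySem.Dict.mk ((pvReps c n').map (fun t => (c t, pvBucket c n' t))) := by
  intro n'
  induction n' with
  | zero => rfl
  | succ n' ih =>
    rw [pvGDict_succ, ih, PySem.Dict.modify]
    have hkeys : (PySem.Dict.mk ((pvReps c n').map (fun t => (c t, pvBucket c n' t)))).keys
        = (pvReps c n').map c := by
      simp [PySem.Dict.keys, List.map_map]
    have hnodup : (PySem.Dict.mk ((pvReps c n').map (fun t => (c t, pvBucket c n' t)))).keys.Nodup := by
      rw [hkeys]; exact pvReps_keys_nodup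
    by_cases hrep : ∀ s, s < n' → c s ≠ c n'
    · -- fresh class: a new key is appended
      have hnc : (PySem.Dict.mk ((pvReps c n').map (fun t => (c t, pvBucket c n' t)))).contains (c n') = false := by
        rw [← Bool.not_eq_true, PySem.Dict.contains_iff_mem_keys, hkeys]
        simp only [List.mem_map]
        rintro ⟨t, ht, hct⟩
        exact absurd hct (hrep t (pvReps_mem.mp ht).1)
      rw [PySem.Dict.getD_of_not_contains _ _ hnc, PySem.Dict.insert, hnc]
      simp only [Bool.false_eq_true, if_false]
      have hadd : PySem.Set.add PySem.Set.empty ((n' : Nat) : Int) = [((n' : Nat) : Int)] := rfl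
      rw [hadd]
      congr 1
      rw [pvReps_succ, if_pos (by simp [pvIsRep]; exact fun s hs => hrep s hs)]
      rw [List.map_append]
      congr 1
      · apply List.map_congr_left
        intro t ht
        have hne : c n' ≠ c t := by
          intro h
          exact hrep t (pvReps_mem.mp ht).1 h.symm
        rw [pvBucket_succ, if_neg hne, List.append_nil]
      · simp only [List.map_cons, List.map_nil]
        rw [pvBucket_succ, if_pos rfl, pvBucket_nil_of_rep hrep, List.nil_append]
    · -- existing class t0: its bucket gets n' appended, in place
      push Not at hrep
      obtain ⟨u, hu, hcu⟩ := hrep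
      obtain ⟨t0, ht0, hct0⟩ := pvReps_find u hu
      have hct0' : c t0 = c n' := hct0.trans hcu
      have hc : (PySem.Dict.mk ((pvReps c n').map (fun t => (c t, pvBucket c n' t)))).contains (c n') = true := by
        rw [PySem.Dict.contains_iff_mem_keys, hkeys]
        exact List.mem_map.mpr ⟨t0, ht0, hct0'⟩
      have hmem : ((c n', pvBucket c n' t0) : Int × PySem.Set Int)
          ∈ (PySem.Dict.mk ((pvReps c n').map (fun t => (c t, pvBucket c n' t)))).items := by
        show _ ∈ (pvReps c n').map _
        exact List.mem_map.mpr ⟨t0, ht0, by rw [hct0']⟩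
      have hgetD : (PySem.Dict.mk ((pvReps c n').map (fun t => (c t, pvBucket c n' t)))).getD (c n') PySem.Set.empty
          = pvBucket c n' t0 := PySem.Dict.getD_of_mem_items _ hmem hnodup _
      rw [hgetD, PySem.Dict.insert, hc]
      simp only [if_true]
      have hadd : PySem.Set.add (pvBucket c n' t0) ((n' : Nat) : Int) = pvBucket c n' t0 ++ [((n' : Nat) : Int)] := by
        unfold PySem.Set.add
        rw [if_neg (by simpa [PySem.Set.contains] using pvBucket_not_mem (c := c) (n' := n') (t := t0))]
      congr 1
      rw [pvReps_succ, if_neg (by simp [pvIsRep]; exact ⟨u, hu, hcu⟩)]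
      rw [List.append_nil, List.map_map]
      apply List.map_congr_left
      intro t ht
      simp only [Function.comp_apply]
      by_cases hteq : c t = c n'
      · have : t = t0 := pvReps_class_inj ht ht0 (by rw [hteq, hct0'])
        subst this
        rw [if_pos (by simpa using hteq)]
        rw [pvBucket_succ, if_pos hteq.symm, hadd]
        rw [hct0']
      · rw [if_neg (by simpa using hteq)]
        rw [pvBucket_succ, if_neg (fun h => hteq h.symm), List.append_nil]

theorem pvGDict_values {c : Nat → Int} {n' : Nat} :
    (pvGDict c n').values = (pvReps c n').map (fun t => pvBucket c n' t) := by
  rw [pvGDict_repr]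
  show ((pvReps c n').map _).map _ = _
  rw [List.map_map]
  rfl

theorem pvOut_congr {c1 c2 : Nat → Int} {n' : Nat}
    (h : ∀ i j, i < n' → j < n' → (c1 i = c1 j ↔ c2 i = c2 j)) :
    (pvGDict c1 n').values.filter (fun g => 1 < g.length)
      = (pvGDict c2 n').values.filter (fun g => 1 < g.length) := by
  have hreps : pvReps c1 n' = pvReps c2 n' := by
    unfold pvReps
    apply List.filter_congr
    intro t ht
    rw [List.mem_range] at ht
    simp only [pvIsRep, decide_eq_decide]
    constructor
    · intro hr s hs hc
      exact hr s hs ((h s t (by omega) ht).mpr hc)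
    · intro hr s hs hc
      exact hr s hs ((h s t (by omega) ht).mp hc)
  have hbuckets : ∀ t, t < n' → pvBucket c1 n' t = pvBucket c2 n' t := by
    intro t ht
    unfold pvBucket
    congr 1
    apply List.filter_congr
    intro j hj
    rw [List.mem_range] at hj
    simp only [decide_eq_decide]
    exact h j t hj ht
  rw [pvGDict_values, pvGDict_values, hreps]
  congr 1
  apply List.map_congr_left
  intro t ht
  exact hbuckets t (pvReps_mem.mp (hreps ▸ ht)).1


-- ---- bridging the two grouping folds to pvGDict ----
theorem pvGetN {lab : List Int} {k : Nat} (hk : k < lab.length) (d : Int) :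
    (PySem.List.pyGet? lab ((k : Nat) : Int)).getD d = lab.getD k 0 := by
  rw [PySem.List.pyGet?_natCast, List.getElem?_eq_getElem hk, List.getD_eq_getElem?_getD,
    List.getElem?_eq_getElem hk]
  rfl

theorem pvGroupB (lab : List Int) : ∀ (l : List Nat) (d : PySem.Dict Int (PySem.Set Int)),
    (∀ k ∈ l, k < lab.length) →
    ((l.map (fun (k : Nat) => (k : Int))).foldl
      (fun (d : PySem.Dict Int (PySem.Set Int)) i =>
        d.modify ((PySem.List.pyGet? lab i).getD 0) PySem.Set.empty (fun s => PySem.Set.add s i)) d)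
    = l.foldl (fun d k => d.modify (lab.getD k 0) PySem.Set.empty (fun s => PySem.Set.add s ((k : Nat) : Int))) d := by
  intro l
  induction l with
  | nil => intro d _; rfl
  | cons k l ih =>
    intro d hl
    rw [List.map_cons, List.foldl_cons, List.foldl_cons]
    rw [pvGetN (hl k (List.mem_cons_self)) 0]
    exact ih _ (fun k' hk' => hl k' (List.mem_cons_of_mem _ hk'))

theorem pvGroupA (ps : List Int) (hws : pvWf ps) (hacycs : pvAcyc ps) :
    ∀ (l : List Nat) (p : List Int) (d : PySem.Dict Int (PySem.Set Int)),
    (∀ k ∈ l, k < ps.length) → p.length = ps.length → pvWf p → pvAcyc p →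
    (∀ k r, k < ps.length → (pvRoot p k r ↔ pvRoot ps k r)) →
    ((l.map (fun (k : Nat) => (k : Int))).foldl
      (fun (st : List Int × PySem.Dict Int (PySem.Set Int)) i =>
        let f := pvFind st.1.length st.1 i
        (f.1, st.2.modify f.2 PySem.Set.empty (fun s => PySem.Set.add s i))) (p, d)).2
    = l.foldl (fun d k => d.modify (((pvRootC ps k : Nat) : Int)) PySem.Set.empty (fun s => PySem.Set.add s ((k : Nat) : Int))) d := by
  intro l
  induction l with
  | nil => intro p d _ _ _ _ _; rfl
  | cons k l ih =>
    intro p d hl hp hw hacyc htr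
    rw [List.map_cons, List.foldl_cons, List.foldl_cons]
    have hk : k < p.length := by rw [hp]; exact hl k (List.mem_cons_self)
    have hroot := pvRootC_root hw hacyc hk
    obtain ⟨m, hmlt, hm⟩ := pvRoot_bound hw hk hroot
    have hspec := pvFind_spec p.length p k (pvRootC p k) m hw hacyc hk hm hroot.2 (by omega)
    have hrc : pvRootC p k = pvRootC ps k := by
      have h1 : pvRoot ps k (pvRootC p k) := (htr k _ (by rw [← hp]; exact hk)).mp hroot
      exact (pvRootC_eq hws hacycs (by rw [← hp]; exact hk) h1).symm
    have hpair : pvFind p.length p ((k : Nat) : Int)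
        = ((pvFind p.length p ((k : Nat) : Int)).1, ((pvRootC ps k : Nat) : Int)) := by
      rw [← hrc, ← hspec.2.1]
    dsimp only
    rw [hpair]
    dsimp only
    rw [ih (pvFind p.length p ((k : Nat) : Int)).1 _
      (fun k' hk' => hl k' (List.mem_cons_of_mem _ hk'))
      (by rw [hspec.1, hp]) hspec.2.2.1 hspec.2.2.2.1
      (fun k' r' hk' => by
        rw [hspec.2.2.2.2 k' r' (by rw [hp]; exact hk')]
        exact htr k' r' hk')]

-- ---- the initial state ----
theorem pvRange_eq (n : Int) :
    PySem.List.pyRange 0 n 1 = (List.range n.toNat).map (fun (k : Nat) => (k : Int)) := by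
  rw [PySem.List.pyRange_one]
  simp

theorem pvInit_getD {n : Int} {k : Nat} (hk : k < n.toNat) :
    ((List.range n.toNat).map (fun (k : Nat) => (k : Int))).getD k 0 = ((k : Nat) : Int) := by
  rw [List.getD_eq_getElem?_getD, List.getElem?_eq_getElem (by simpa using hk)]
  simp

theorem pvInit_step {n : Int} {k : Nat} (hk : k < n.toNat) :
    pvStep ((List.range n.toNat).map (fun (k : Nat) => (k : Int))) k = k := by
  unfold pvStep
  rw [pvInit_getD hk]
  simp

theorem pvInit_wf (n : Int) : pvWf ((List.range n.toNat).map (fun (k : Nat) => (k : Int))) := by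
  intro k hk
  rw [List.length_map, List.length_range] at hk
  constructor
  · rw [pvInit_getD hk, pvInit_step hk]
  · rw [pvInit_step hk, List.length_map, List.length_range]; exact hk

theorem pvInit_acyc (n : Int) : pvAcyc ((List.range n.toNat).map (fun (k : Nat) => (k : Int))) := by
  intro k hk
  rw [List.length_map, List.length_range] at hk
  exact ⟨k, pvRoot_fix (pvInit_step hk)⟩

theorem pvInit_rel (n : Int) : ∀ i j, i < n.toNat → j < n.toNat →
    (pvSame ((List.range n.toNat).map (fun (k : Nat) => (k : Int))) i j ↔
      ((List.range n.toNat).map (fun (k : Nat) => (k : Int))).getD i 0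
        = ((List.range n.toNat).map (fun (k : Nat) => (k : Int))).getD j 0) := by
  intro i j hi hj
  rw [pvInit_getD hi, pvInit_getD hj]
  constructor
  · rintro ⟨r, h1, h2⟩
    have hri := pvRoot_of_fix_eq (pvInit_step hi) h1
    have hrj := pvRoot_of_fix_eq (pvInit_step hj) h2
    simp [← hri, ← hrj]
  · intro h
    have : i = j := by simpa using h
    subst this
    exact ⟨i, pvRoot_fix (pvInit_step hi), pvRoot_fix (pvInit_step hi)⟩

theorem cluster_union_find_spec : Claim_equal_cluster_union_find := by
  unfold Claim_equal_cluster_union_find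
  intro n edges _ hpre
  unfold Spec_cluster_union_find
  by_cases hn : 0 ≤ n
  · -- the real case
    set N := n.toNat with hN
    have hNn : ((N : Nat) : Int) = n := Int.toNat_of_nonneg hn
    have hbounds : ∀ e ∈ edges, (-(N : Int) ≤ e.1 ∧ e.1 < (N : Int)) ∧ (-(N : Int) ≤ e.2 ∧ e.2 < (N : Int)) := by
      intro e he
      rw [hNn]
      exact hpre e he
    have hrange : PySem.List.pyRange 0 n 1 = (List.range N).map (fun (k : Nat) => (k : Int)) :=
      pvRange_eq n
    have hinitlen : ((List.range N).map (fun (k : Nat) => (k : Int))).length = N := by simp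
    obtain ⟨hPlen, hLlen, hPwf, hPacyc, hrel⟩ :=
      pvFold_inv N edges ((List.range N).map (fun (k : Nat) => (k : Int)))
        ((List.range N).map (fun (k : Nat) => (k : Int)))
        hbounds hinitlen hinitlen (pvInit_wf n) (pvInit_acyc n) (pvInit_rel n)
    set P := edges.foldl (fun p e => pvUnion p e.1 e.2)
      ((List.range N).map (fun (k : Nat) => (k : Int))) with hP
    set L := edges.foldl (fun lab (e : Int × Int) =>
      let la := (PySem.List.pyGet? lab e.1).getD 0
      let lb := (PySem.List.pyGet? lab e.2).getD 0
      if la ≠ lb then lab.map (fun x => if x = lb then la else x) else lab)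
      ((List.range N).map (fun (k : Nat) => (k : Int))) with hL
    have hA : cluster_union_find n edges
        = (pvGDict (fun k => ((pvRootC P k : Nat) : Int)) N).values.filter (fun g => 1 < g.length) := by
      unfold cluster_union_find
      rw [hrange]
      dsimp only
      rw [pvGroupA P hPwf hPacyc (List.range N) P PySem.Dict.empty
        (fun k hk => by rw [hPlen]; simpa using hk) rfl hPwf hPacyc (fun _ _ _ => Iff.rfl)]
      rfl
    have hB : cluster_union_find_alt n edges
        = (pvGDict (fun k => L.getD k 0) N).values.filter (fun g => 1 < g.length) := by
      unfold cluster_union_find_alt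
      rw [hrange]
      dsimp only
      rw [pvGroupB L (List.range N) PySem.Dict.empty
        (fun k hk => by rw [hLlen]; simpa using hk)]
      rfl
    rw [hA, hB]
    apply pvOut_congr
    intro i j hi hj
    have h1 : (((pvRootC P i : Nat) : Int) = ((pvRootC P j : Nat) : Int)) ↔ pvRootC P i = pvRootC P j :=
      Int.natCast_inj
    rw [h1, ← pvSame_iff_rootC hPwf hPacyc (by rw [hPlen]; exact hi) (by rw [hPlen]; exact hj)]
    exact hrel i j hi hj
  · -- n < 0 : Pre_ forces edges = [] and both sides are []
    have hed : edges = [] := by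
      cases edges with
      | nil => rfl
      | cons e rest =>
        obtain ⟨⟨h1, h2⟩, _⟩ := hpre e List.mem_cons_self
        omega
    subst hed
    have hnil : PySem.List.pyRange 0 n 1 = [] := PySem.List.pyRange_one_eq_nil (by omega)
    simp [cluster_union_find, cluster_union_find_alt, hnil]
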